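-- pv_equiv track=rewrite | github.com/reisset/yourSQLfriend | src/yoursqlfriend/validation.py | strip_strings_and_comments
-- ===== SOURCE A (Python) =====
-- def strip_strings_and_comments(sql):
--     """
--     Remove string literals and comments from SQL for security analysis.
--     This prevents false positives from content inside strings/comments.
--     """
--     result = []
--     i = 0
--     in_single_quote = False
--     in_double_quote = False
--
--     while i < len(sql):
--         # Handle single-line comments (-- style)
--         if not in_single_quote and not in_double_quote and sql[i:i+2] == '--':
--             # Skip to end of line
--             while i < len(sql) and sql[i] != '\n':
--                 i += 1
--             continue
--
--         # Handle multi-line comments (/* */ style)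
--         if not in_single_quote and not in_double_quote and sql[i:i+2] == '/*':
--             i += 2
--             closed = False
--             while i < len(sql) - 1:
--                 if sql[i:i+2] == '*/':
--                     i += 2
--                     closed = True
--                     break
--                 i += 1
--             if not closed:
--                 # Unclosed block comment — strip remainder as comment
--                 break
--             continue
--
--         # Handle single quotes (with escape handling)
--         if sql[i] == "'" and not in_double_quote:
--             if in_single_quote:
--                 # Check for escaped quote ('')
--                 if i + 1 < len(sql) and sql[i+1] == "'":
--                     i += 2
--                     continue
--                 in_single_quote = False
--             else:
--                 in_single_quote = True
--             i += 1
--             continue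
--
--         # Handle double quotes
--         if sql[i] == '"' and not in_single_quote:
--             if in_double_quote:
--                 if i + 1 < len(sql) and sql[i+1] == '"':
--                     i += 2
--                     continue
--                 in_double_quote = False
--             else:
--                 in_double_quote = True
--             i += 1
--             continue
--
--         # Only include characters outside of strings
--         if not in_single_quote and not in_double_quote:
--             result.append(sql[i])
--
--         i += 1
--
--     return ''.join(result)
-- ===== SOURCE B (Python) =====
-- def strip_strings_and_comments(sql):
--     """
--     Remove string literals and comments from SQL for security analysis.
--     Find-and-slice segmenter: instead of scanning character by character,
--     repeatedly locate the earliest opener ('--', '/*', quote) with str.find,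
--     emit the preceding chunk wholesale, and jump past the whole comment or
--     string literal with another find.
--     """
--     res = []
--     s = sql
--     while True:
--         best = None
--         for pat, kind in (('--', 0), ('/*', 1), ("'", 2), ('"', 3)):
--             p = s.find(pat)
--             if p != -1 and (best is None or (p, kind) < best):
--                 best = (p, kind)
--         if best is None:
--             res.append(s)
--             break
--         p, kind = best
--         res.append(s[:p])
--         if kind == 0:  # line comment: drop up to (not including) the newline
--             j = s.find('\n', p + 2)
--             if j == -1:
--                 break
--             s = s[j:]
--         elif kind == 1:  # block comment: drop through the closing */
--             j = s.find('*/', p + 2)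
--             if j == -1:
--                 break
--             s = s[j + 2:]
--         else:  # string literal: closing quote is the first quote not doubled
--             q = "'" if kind == 2 else '"'
--             k = p + 1
--             while True:
--                 j = s.find(q, k)
--                 if j == -1:
--                     break
--                 if j + 1 < len(s) and s[j + 1] == q:
--                     k = j + 2
--                 else:
--                     k = j + 1
--                     break
--             if j == -1:
--                 break
--             s = s[k:]
--     return ''.join(res)
-- ===== Notes on version B (the rewrite author's own statement) =====
-- stated objective: faster
-- what changed: Replaces A's per-character flag-driven scanner with a find-and-slice segmenter: it repeatedly locates the earliest opener ('--', '/*', quote) via str.find, emits the preceding chunk as one slice, and jumps past the whole comment/literal with another find, never maintaining per-character quote/comment state.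
import Mathlib
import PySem

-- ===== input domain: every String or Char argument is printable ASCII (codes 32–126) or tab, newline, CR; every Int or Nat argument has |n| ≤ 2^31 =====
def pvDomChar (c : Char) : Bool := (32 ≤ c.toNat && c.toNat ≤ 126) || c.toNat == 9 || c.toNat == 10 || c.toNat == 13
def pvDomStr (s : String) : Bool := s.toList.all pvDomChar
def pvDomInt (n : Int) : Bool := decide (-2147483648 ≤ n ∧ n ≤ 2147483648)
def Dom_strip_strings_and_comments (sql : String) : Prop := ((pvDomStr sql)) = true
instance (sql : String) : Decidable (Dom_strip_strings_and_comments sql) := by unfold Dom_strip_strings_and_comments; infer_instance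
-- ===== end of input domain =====

-- B replaces A's per-character flag-driven scanner with a find-and-slice segmenter:
-- it locates the earliest opener by substring search, emits the preceding chunk as
-- one slice, and jumps past the whole comment/literal (objective: faster, measured).

-- ===== PORT A =====

-- A's inner `while i < len(sql) and sql[i] != '\n': i += 1` (skip to end of line)
def pvSkipLine : List Char → List Char
  | [] => []
  | c :: r => if c = '\n' then c :: r else pvSkipLine r

-- A's inner `while i < len(sql)-1: if sql[i:i+2]=='*/': …` loop; `none` = unclosed
-- (a lone final character can never match the two-char '*/', exactly as in A).
def pvSkipBlock : List Char → Option (List Char)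
  | [] => none
  | c :: r => if c = '*' ∧ r.head? = some '/' then some r.tail else pvSkipBlock r

theorem pvSkipLine_len_le (cs : List Char) : (pvSkipLine cs).length ≤ cs.length := by
  induction cs with
  | nil => simp [pvSkipLine]
  | cons c r ih =>
    simp only [pvSkipLine]
    split <;> simp <;> omega

theorem pvSkipBlock_len_le : ∀ (cs r' : List Char), pvSkipBlock cs = some r' → r'.length ≤ cs.length := by
  intro cs
  induction cs with
  | nil => intro r' h; simp [pvSkipBlock] at h
  | cons c r ih =>
    intro r' h
    simp only [pvSkipBlock] at h
    split at h
    · injection h with h; subst h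
      cases r <;> simp <;> omega
    · exact Nat.le_succ_of_le (ih r' h)

-- A's outer while loop: state = (remaining input, in_single_quote, in_double_quote)
def pvGoA : List Char → Bool → Bool → List Char
  | [], _, _ => []
  | c :: r, sq, dq =>
    -- single-line comment (-- style)
    if sq = false ∧ dq = false ∧ c = '-' ∧ r.head? = some '-' then
      pvGoA (pvSkipLine r) false false  -- the dashes themselves are not '\n', so skipping starts after them
    -- multi-line comment (/* */ style)
    else if sq = false ∧ dq = false ∧ c = '/' ∧ r.head? = some '*' then
      match _h : pvSkipBlock r.tail with
      | some r' => pvGoA r' false false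
      | none => []                       -- unclosed block comment: strip remainder
    -- single quotes (with '' escape)
    else if c = '\'' ∧ dq = false then
      if sq then
        if r.head? = some '\'' then pvGoA r.tail true false
        else pvGoA r false false
      else pvGoA r true false
    -- double quotes (with "" escape)
    else if c = '"' ∧ sq = false then
      if dq then
        if r.head? = some '"' then pvGoA r.tail false true
        else pvGoA r false false
      else pvGoA r false true
    -- only include characters outside of strings
    else if sq = false ∧ dq = false then c :: pvGoA r sq dq
    else pvGoA r sq dq
termination_by cs _ _ => cs.length
decreasing_by
  · have := pvSkipLine_len_le r; simp; omega
  · have := pvSkipBlock_len_le r.tail r' _h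
    have : r.tail.length ≤ r.length := by cases r <;> simp
    simp; omega
  · cases r <;> simp_all
  · simp
  · simp
  · cases r <;> simp_all
  · simp
  · simp
  · simp
  · simp

def strip_strings_and_comments (sql : String) : String :=
  String.mk (pvGoA sql.toList false false)

-- ===== PORT B =====

-- Python's s.find(ch) on the tail list (single-character pattern)
def pvFindCh (c : Char) : List Char → Option Nat
  | [] => none
  | a :: r => if a = c then some 0 else (pvFindCh c r).map (· + 1)

-- Python's s.find(p) for a two-character pattern p = a b
def pvFind2 (a b : Char) : List Char → Option Nat
  | [] => none
  | x :: r => if x = a ∧ r.head? = some b then some 0 else (pvFind2 a b r).map (· + 1)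

theorem pvFindCh_lt (c : Char) : ∀ (cs : List Char) (j : Nat), pvFindCh c cs = some j → j < cs.length := by
  intro cs
  induction cs with
  | nil => intro j h; simp [pvFindCh] at h
  | cons a r ih =>
    intro j h
    simp only [pvFindCh] at h
    split at h
    · injection h with h; subst h; simp
    · cases hr : pvFindCh c r with
      | none => rw [hr] at h; simp at h
      | some j' =>
        rw [hr] at h; simp at h
        have := ih j' hr
        simp only [List.length_cons]; omega

-- B's inner doubled-quote loop: `j = s.find(q, k); if s[j+1]==q: k=j+2 … else k=j+1`;
-- returns the remainder after the closing quote, `none` if the literal is unclosed.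
def pvFindClose (q : Char) (cs : List Char) : Option (List Char) :=
  match h : pvFindCh q cs with
  | none => none
  | some j =>
    if (cs.drop (j + 1)).head? = some q then pvFindClose q (cs.drop (j + 2))
    else some (cs.drop (j + 1))
termination_by cs.length
decreasing_by
  have := pvFindCh_lt q cs j h
  simp
  omega

theorem pvFindClose_len_aux (q : Char) : ∀ (n : Nat) (cs rest : List Char), cs.length ≤ n → pvFindClose q cs = some rest → rest.length < cs.length := by
  intro n
  induction n with
  | zero =>
    intro cs rest hle h
    have : cs = [] := by cases cs <;> simp_all
    subst this
    rw [pvFindClose] at h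
    simp [pvFindCh] at h
  | succ n ih =>
    intro cs rest hle h
    rw [pvFindClose] at h
    split at h
    · exact absurd h (by simp)
    · rename_i j hj
      have hjlt := pvFindCh_lt q cs j hj
      split at h
      · have := ih (cs.drop (j + 2)) rest (by simp; omega) h
        simp at this; omega
      · injection h with h; subst h; simp; omega

theorem pvFindClose_len (q : Char) (cs rest : List Char) (h : pvFindClose q cs = some rest) : rest.length < cs.length :=
  pvFindClose_len_aux q cs.length cs rest le_rfl h

-- kind codes as in Source B: 0 = '--', 1 = '/*', 2 = single quote, 3 = double quote
def pvTag (k : Nat) (o : Option Nat) : Option (Nat × Nat) := o.map (fun p => (p, k))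

-- `(p, kind) < best` comparison of Source B (lexicographic; keep current best on no improvement)
def pvMinOpt : Option (Nat × Nat) → Option (Nat × Nat) → Option (Nat × Nat)
  | none, y => y
  | some x, none => some x
  | some x, some y => if y.1 < x.1 ∨ (y.1 = x.1 ∧ y.2 < x.2) then some y else some x

-- B's opener search: min over the four finds
def pvEarliest (s : List Char) : Option (Nat × Nat) :=
  pvMinOpt (pvMinOpt (pvTag 0 (pvFind2 '-' '-' s)) (pvTag 1 (pvFind2 '/' '*' s)))
           (pvMinOpt (pvTag 2 (pvFindCh '\'' s)) (pvTag 3 (pvFindCh '"' s)))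

theorem pvEarliest_pos (s : List Char) (x : Nat × Nat) (h : pvEarliest s = some x) : 0 < s.length := by
  cases s with
  | nil => simp [pvEarliest, pvFind2, pvFindCh, pvTag, pvMinOpt] at h
  | cons c r => simp

-- B's outer while loop over the remaining slice
def pvGoAlt (s : List Char) : List Char :=
  match _h : pvEarliest s with
  | none => s
  | some (p, k) =>
    s.take p ++
    (if k = 0 then
      -- line comment: drop up to (not including) the newline; find('\n', p+2)
      match pvFindCh '\n' (s.drop (p + 2)) with
      | none => []
      | some j => pvGoAlt (s.drop (p + 2 + j))
    else if k = 1 then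
      -- block comment: drop through closing */; find('*/', p+2)
      match pvFind2 '*' '/' (s.drop (p + 2)) with
      | none => []
      | some j => pvGoAlt (s.drop (p + 2 + j + 2))
    else
      match _hc : pvFindClose (if k = 2 then '\'' else '"') (s.drop (p + 1)) with
      | none => []
      | some rest => pvGoAlt rest)
termination_by s.length
decreasing_by
  · have := pvEarliest_pos s (p, k) _h
    simp; omega
  · have := pvEarliest_pos s (p, k) _h
    simp; omega
  · have h1 := pvFindClose_len _ _ _ _hc
    simp at h1
    omega

def strip_strings_and_comments_alt (sql : String) : String :=
  String.mk (pvGoAlt sql.toList)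

-- ===== PRECONDITION & SPEC =====
def Spec_strip_strings_and_comments (sql : String) (out : String) : Prop := out = strip_strings_and_comments_alt sql
instance (sql : String) (out : String) : Decidable (Spec_strip_strings_and_comments sql out) := by unfold Spec_strip_strings_and_comments; infer_instance

-- ===== CLAIM (what is proved, stated in full; the proofs are below) =====
def Claim_equal_strip_strings_and_comments : Prop := ∀ (sql : String), Dom_strip_strings_and_comments sql → Spec_strip_strings_and_comments sql (strip_strings_and_comments sql)

-- ===== LEMMAS AND PROOFS =====

def pvShift : Nat × Nat → Nat × Nat := fun pk => (pk.1 + 1, pk.2)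

theorem pvTag_shift (k : Nat) (o : Option Nat) :
    pvTag k (o.map (· + 1)) = (pvTag k o).map pvShift := by
  cases o <;> simp [pvTag, pvShift]

theorem pvMinOpt_map (x y : Option (Nat × Nat)) :
    pvMinOpt (x.map pvShift) (y.map pvShift) = (pvMinOpt x y).map pvShift := by
  cases x with
  | none => cases y <;> simp [pvMinOpt]
  | some a =>
    cases y with
    | none => simp [pvMinOpt]
    | some b =>
      simp only [Option.map_some, pvMinOpt, pvShift]
      by_cases h : b.1 < a.1 ∨ (b.1 = a.1 ∧ b.2 < a.2)
      · rw [if_pos h, if_pos (by omega)]; simp [pvShift]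
      · rw [if_neg h, if_neg (by omega)]; simp [pvShift]

-- the min-of-four-candidates kernel of pvEarliest
def pvE4 (x0 x1 x2 x3 : Option Nat) : Option (Nat × Nat) :=
  pvMinOpt (pvMinOpt (pvTag 0 x0) (pvTag 1 x1)) (pvMinOpt (pvTag 2 x2) (pvTag 3 x3))

theorem pvE4_zero0 (o1 o2 o3 : Option Nat) :
    pvE4 (some 0) (o1.map (· + 1)) (o2.map (· + 1)) (o3.map (· + 1)) = some (0, 0) := by
  cases o1 <;> cases o2 <;> cases o3 <;>
    (simp [pvE4, pvTag, pvMinOpt]; try split_ifs) <;> simp_all <;> omega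

theorem pvE4_zero1 (o0 o2 o3 : Option Nat) :
    pvE4 (o0.map (· + 1)) (some 0) (o2.map (· + 1)) (o3.map (· + 1)) = some (0, 1) := by
  cases o0 <;> cases o2 <;> cases o3 <;>
    (simp [pvE4, pvTag, pvMinOpt]; try split_ifs) <;> simp_all <;> omega

theorem pvE4_zero2 (o0 o1 o3 : Option Nat) :
    pvE4 (o0.map (· + 1)) (o1.map (· + 1)) (some 0) (o3.map (· + 1)) = some (0, 2) := by
  cases o0 <;> cases o1 <;> cases o3 <;>
    (simp [pvE4, pvTag, pvMinOpt]; try split_ifs) <;> simp_all <;> omega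

theorem pvE4_zero3 (o0 o1 o2 : Option Nat) :
    pvE4 (o0.map (· + 1)) (o1.map (· + 1)) (o2.map (· + 1)) (some 0) = some (0, 3) := by
  cases o0 <;> cases o1 <;> cases o2 <;>
    (simp [pvE4, pvTag, pvMinOpt]; try split_ifs) <;> simp_all <;> omega

theorem pvE4_shift (o0 o1 o2 o3 : Option Nat) :
    pvE4 (o0.map (· + 1)) (o1.map (· + 1)) (o2.map (· + 1)) (o3.map (· + 1)) =
      (pvE4 o0 o1 o2 o3).map pvShift := by
  unfold pvE4
  rw [pvTag_shift, pvTag_shift, pvTag_shift, pvTag_shift,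
    pvMinOpt_map, pvMinOpt_map, pvMinOpt_map]

theorem pvEarliest_cons (c : Char) (r : List Char) :
    pvEarliest (c :: r) =
      if c = '-' ∧ r.head? = some '-' then some (0, 0)
      else if c = '/' ∧ r.head? = some '*' then some (0, 1)
      else if c = '\'' then some (0, 2)
      else if c = '"' then some (0, 3)
      else (pvEarliest r).map pvShift := by
  rw [show ∀ s, pvEarliest s = pvE4 (pvFind2 '-' '-' s) (pvFind2 '/' '*' s)
        (pvFindCh '\'' s) (pvFindCh '"' s) from fun _ => rfl,
      show ∀ s, pvEarliest s = pvE4 (pvFind2 '-' '-' s) (pvFind2 '/' '*' s)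
        (pvFindCh '\'' s) (pvFindCh '"' s) from fun _ => rfl]
  simp only [pvFindCh, pvFind2]
  split_ifs <;>
    first
      | exact pvE4_zero0 _ _ _
      | exact pvE4_zero1 _ _ _
      | exact pvE4_zero2 _ _ _
      | exact pvE4_zero3 _ _ _
      | exact pvE4_shift _ _ _ _
      | simp_all

-- A's skip-to-newline loop expressed through B's find
theorem pvSkipLine_of_none (t : List Char) (h : pvFindCh '\n' t = none) :
    pvSkipLine t = [] := by
  induction t with
  | nil => rfl
  | cons c r ih =>
    simp only [pvFindCh] at h
    split at h
    · exact absurd h (by simp)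
    · rename_i hc
      have : pvFindCh '\n' r = none := by
        cases hr : pvFindCh '\n' r <;> rw [hr] at h <;> simp_all
      simp only [pvSkipLine]
      rw [if_neg hc]
      exact ih this

theorem pvSkipLine_of_some (t : List Char) : ∀ (j : Nat), pvFindCh '\n' t = some j →
    pvSkipLine t = t.drop j := by
  induction t with
  | nil => intro j h; simp [pvFindCh] at h
  | cons c r ih =>
    intro j h
    simp only [pvFindCh] at h
    split at h
    · rename_i hc
      injection h with h; subst h
      simp [pvSkipLine, hc]
    · rename_i hc
      cases hr : pvFindCh '\n' r with
      | none => rw [hr] at h; simp at h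
      | some j' =>
        rw [hr] at h; simp at h; subst h
        simp only [pvSkipLine, List.drop_succ_cons]
        rw [if_neg hc]
        exact ih j' hr

-- A's '*/'-search loop expressed through B's find
theorem pvSkipBlock_of_none (t : List Char) (h : pvFind2 '*' '/' t = none) :
    pvSkipBlock t = none := by
  induction t with
  | nil => rfl
  | cons c r ih =>
    simp only [pvFind2] at h
    split at h
    · exact absurd h (by simp)
    · rename_i hc
      have : pvFind2 '*' '/' r = none := by
        cases hr : pvFind2 '*' '/' r <;> rw [hr] at h <;> simp_all
      simp only [pvSkipBlock]
      rw [if_neg hc]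
      exact ih this

theorem pvSkipBlock_of_some (t : List Char) : ∀ (j : Nat), pvFind2 '*' '/' t = some j →
    pvSkipBlock t = some (t.drop (j + 2)) := by
  induction t with
  | nil => intro j h; simp [pvFind2] at h
  | cons c r ih =>
    intro j h
    simp only [pvFind2] at h
    split at h
    · rename_i hc
      injection h with h; subst h
      simp only [pvSkipBlock]
      rw [if_pos hc]
      cases r <;> simp_all
    · rename_i hc
      cases hr : pvFind2 '*' '/' r with
      | none => rw [hr] at h; simp at h
      | some j' =>
        rw [hr] at h; simp at h; subst h
        simp only [pvSkipBlock]
        rw [if_neg hc]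
        rw [ih j' hr]
        simp [List.drop_succ_cons, show j' + 1 + 2 = (j' + 2) + 1 by omega]

-- the element found by pvFindCh really is there
theorem pvFindCh_drop (q : Char) (t : List Char) : ∀ (j : Nat), pvFindCh q t = some j →
    t.drop j = q :: t.drop (j + 1) := by
  induction t with
  | nil => intro j h; simp [pvFindCh] at h
  | cons c r ih =>
    intro j h
    simp only [pvFindCh] at h
    split at h
    · rename_i hc
      injection h with h; subst h
      simp [hc]
    · cases hr : pvFindCh q r with
      | none => rw [hr] at h; simp at h
      | some j' =>
        rw [hr] at h; simp at h; subst h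
        simp only [List.drop_succ_cons]
        exact ih j' hr

-- inside a single-quoted literal A emits nothing and only watches for the quote
theorem pvGoA_sq_step (c : Char) (r : List Char) (hc : c ≠ '\'') :
    pvGoA (c :: r) true false = pvGoA r true false := by
  rw [pvGoA]
  simp [hc]

theorem pvGoA_dq_step (c : Char) (r : List Char) (hc : c ≠ '"') :
    pvGoA (c :: r) false true = pvGoA r false true := by
  rw [pvGoA]
  simp [hc]

theorem pvGoA_sq_none (t : List Char) (h : pvFindCh '\'' t = none) :
    pvGoA t true false = [] := by
  induction t with
  | nil => rw [pvGoA]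
  | cons c r ih =>
    simp only [pvFindCh] at h
    split at h
    · exact absurd h (by simp)
    · rename_i hc
      have : pvFindCh '\'' r = none := by
        cases hr : pvFindCh '\'' r <;> rw [hr] at h <;> simp_all
      rw [pvGoA_sq_step c r hc]
      exact ih this

theorem pvGoA_dq_none (t : List Char) (h : pvFindCh '"' t = none) :
    pvGoA t false true = [] := by
  induction t with
  | nil => rw [pvGoA]
  | cons c r ih =>
    simp only [pvFindCh] at h
    split at h
    · exact absurd h (by simp)
    · rename_i hc
      have : pvFindCh '"' r = none := by
        cases hr : pvFindCh '"' r <;> rw [hr] at h <;> simp_all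
      rw [pvGoA_dq_step c r hc]
      exact ih this

theorem pvGoA_sq_skip (t : List Char) : ∀ (j : Nat), pvFindCh '\'' t = some j →
    pvGoA t true false = pvGoA (t.drop j) true false := by
  induction t with
  | nil => intro j h; simp [pvFindCh] at h
  | cons c r ih =>
    intro j h
    simp only [pvFindCh] at h
    split at h
    · injection h with h; subst h; rfl
    · rename_i hc
      cases hr : pvFindCh '\'' r with
      | none => rw [hr] at h; simp at h
      | some j' =>
        rw [hr] at h; simp at h; subst h
        rw [pvGoA_sq_step c r hc, List.drop_succ_cons]
        exact ih j' hr

theorem pvGoA_dq_skip (t : List Char) : ∀ (j : Nat), pvFindCh '"' t = some j →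
    pvGoA t false true = pvGoA (t.drop j) false true := by
  induction t with
  | nil => intro j h; simp [pvFindCh] at h
  | cons c r ih =>
    intro j h
    simp only [pvFindCh] at h
    split at h
    · injection h with h; subst h; rfl
    · rename_i hc
      cases hr : pvFindCh '"' r with
      | none => rw [hr] at h; simp at h
      | some j' =>
        rw [hr] at h; simp at h; subst h
        rw [pvGoA_dq_step c r hc, List.drop_succ_cons]
        exact ih j' hr

-- the whole single-quoted-literal mode of A = one pvFindClose jump of B
theorem pvGoA_sq_close : ∀ (n : Nat) (t : List Char), t.length ≤ n →
    pvGoA t true false = (pvFindClose '\'' t).elim [] (fun rest => pvGoA rest false false) := by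
  intro n
  induction n with
  | zero =>
    intro t hle
    have : t = [] := by cases t <;> simp_all
    subst this
    rw [pvGoA, pvFindClose]
    simp [pvFindCh]
  | succ n ih =>
    intro t hle
    cases hf : pvFindCh '\'' t with
    | none =>
      have hclose : pvFindClose '\'' t = none := by
        rw [pvFindClose]; split <;> simp_all
      rw [hclose]
      simpa using pvGoA_sq_none t hf
    | some j =>
      have hjlt := pvFindCh_lt '\'' t j hf
      have hdrop := pvFindCh_drop '\'' t j hf
      have hclose : pvFindClose '\'' t =
          if (t.drop (j + 1)).head? = some '\'' then pvFindClose '\'' (t.drop (j + 2))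
          else some (t.drop (j + 1)) := by
        rw [pvFindClose]
        split
        · simp_all
        · rename_i j' hj'
          rw [hf] at hj'; injection hj' with hj'; subst hj'; rfl
      rw [pvGoA_sq_skip t j hf, hdrop, hclose, pvGoA]
      simp only [Bool.true_eq_false, false_and, if_false, and_true, if_true]
      by_cases hq : (t.drop (j + 1)).head? = some '\''
      · rw [if_pos hq, if_pos hq, List.tail_drop]
        have : t.drop (j + 1 + 1) = t.drop (j + 2) := by rw [show j + 1 + 1 = j + 2 by omega]
        rw [this]
        exact ih (t.drop (j + 2)) (by simp; omega)
      · rw [if_neg hq, if_neg hq]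
        simp
  
theorem pvGoA_dq_close : ∀ (n : Nat) (t : List Char), t.length ≤ n →
    pvGoA t false true = (pvFindClose '"' t).elim [] (fun rest => pvGoA rest false false) := by
  intro n
  induction n with
  | zero =>
    intro t hle
    have : t = [] := by cases t <;> simp_all
    subst this
    rw [pvGoA, pvFindClose]
    simp [pvFindCh]
  | succ n ih =>
    intro t hle
    cases hf : pvFindCh '"' t with
    | none =>
      have hclose : pvFindClose '"' t = none := by
        rw [pvFindClose]; split <;> simp_all
      rw [hclose]
      simpa using pvGoA_dq_none t hf
    | some j =>
      have hjlt := pvFindCh_lt '"' t j hf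
      have hdrop := pvFindCh_drop '"' t j hf
      have hclose : pvFindClose '"' t =
          if (t.drop (j + 1)).head? = some '"' then pvFindClose '"' (t.drop (j + 2))
          else some (t.drop (j + 1)) := by
        rw [pvFindClose]
        split
        · simp_all
        · rename_i j' hj'
          rw [hf] at hj'; injection hj' with hj'; subst hj'; rfl
      rw [pvGoA_dq_skip t j hf, hdrop, hclose, pvGoA]
      simp only [Bool.true_eq_false, false_and, and_false, if_false, and_true, if_true]
      by_cases hq : (t.drop (j + 1)).head? = some '"'
      · rw [if_pos hq, if_pos hq, List.tail_drop]
        have : t.drop (j + 1 + 1) = t.drop (j + 2) := by rw [show j + 1 + 1 = j + 2 by omega]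
        rw [this]
        exact ih (t.drop (j + 2)) (by simp; omega)
      · rw [if_neg hq, if_neg hq]
        simp

-- unfolding equations for pvGoAlt at a known earliest-opener value
theorem pvGoAlt_eq_none (s : List Char) (h : pvEarliest s = none) : pvGoAlt s = s := by
  conv_lhs => rw [pvGoAlt]
  split
  · rfl
  · rename_i p k heq; rw [h] at heq; exact absurd heq (by simp)

theorem pvGoAlt_eq_some (s : List Char) (p k : Nat) (h : pvEarliest s = some (p, k)) :
    pvGoAlt s = s.take p ++
      (if k = 0 then
        match pvFindCh '\n' (s.drop (p + 2)) with
        | none => []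
        | some j => pvGoAlt (s.drop (p + 2 + j))
      else if k = 1 then
        match pvFind2 '*' '/' (s.drop (p + 2)) with
        | none => []
        | some j => pvGoAlt (s.drop (p + 2 + j + 2))
      else
        match pvFindClose (if k = 2 then '\'' else '"') (s.drop (p + 1)) with
        | none => []
        | some rest => pvGoAlt rest) := by
  conv_lhs => rw [pvGoAlt]
  split
  · rename_i heq; rw [h] at heq; exact absurd heq (by simp)
  · rename_i p' k' heq
    rw [h] at heq; injection heq with heq
    injection heq with hp hk
    subst hp; subst hk
    congr 1
    split_ifs with hk0 hk1 hk2
    · rfl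
    · rfl
    · split
      · rename_i heq'; rw [if_pos hk2] at heq'; rw [heq']
      · rename_i rest heq'; rw [if_pos hk2] at heq'; rw [heq']
    · split
      · rename_i heq'; rw [if_neg hk2] at heq'; rw [heq']
      · rename_i rest heq'; rw [if_neg hk2] at heq'; rw [heq']

-- peeling one plain character off B's segmenter
theorem pvGoAlt_peel (c : Char) (r : List Char) (p k : Nat)
    (her : pvEarliest r = some (p, k)) (hec : pvEarliest (c :: r) = some (p + 1, k)) :
    pvGoAlt (c :: r) = c :: pvGoAlt r := by
  rw [pvGoAlt_eq_some _ _ _ hec, pvGoAlt_eq_some _ _ _ her]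
  simp only [List.take_succ_cons, List.cons_append]
  congr 1
  congr 1
  split_ifs with hk0 hk1
  · have hd : (c :: r).drop (p + 1 + 2) = r.drop (p + 2) := by
      rw [show p + 1 + 2 = (p + 2) + 1 by omega, List.drop_succ_cons]
    rw [hd]
    cases hf : pvFindCh '\n' (r.drop (p + 2)) with
    | none => rfl
    | some j =>
      show pvGoAlt ((c :: r).drop (p + 1 + 2 + j)) = pvGoAlt (r.drop (p + 2 + j))
      rw [show p + 1 + 2 + j = (p + 2 + j) + 1 by omega, List.drop_succ_cons]
  · have hd : (c :: r).drop (p + 1 + 2) = r.drop (p + 2) := by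
      rw [show p + 1 + 2 = (p + 2) + 1 by omega, List.drop_succ_cons]
    rw [hd]
    cases hf : pvFind2 '*' '/' (r.drop (p + 2)) with
    | none => rfl
    | some j =>
      show pvGoAlt ((c :: r).drop (p + 1 + 2 + j + 2)) = pvGoAlt (r.drop (p + 2 + j + 2))
      rw [show p + 1 + 2 + j + 2 = (p + 2 + j + 2) + 1 by omega, List.drop_succ_cons]
  · have hd : (c :: r).drop (p + 1 + 1) = r.drop (p + 1) := by
      rw [show p + 1 + 1 = (p + 1) + 1 by omega, List.drop_succ_cons]
    rw [hd]
  · have hd : (c :: r).drop (p + 1 + 1) = r.drop (p + 1) := by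
      rw [show p + 1 + 1 = (p + 1) + 1 by omega, List.drop_succ_cons]
    rw [hd]

theorem pvGoA_block (t : List Char) :
    pvGoA ('/' :: '*' :: t) false false =
      (pvSkipBlock t).elim [] (fun r' => pvGoA r' false false) := by
  rw [pvGoA, if_neg (by simp), if_pos (by simp :
    false = false ∧ false = false ∧ '/' = '/' ∧ ('*' :: t).head? = some '*'), List.tail_cons]
  split
  · rename_i r' heq; rw [heq]; rfl
  · rename_i heq; rw [heq]; rfl

theorem pv_main_aux : ∀ (n : Nat) (cs : List Char), cs.length ≤ n →
    pvGoA cs false false = pvGoAlt cs := by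
  intro n
  induction n with
  | zero =>
    intro cs hle
    have : cs = [] := by cases cs <;> simp_all
    subst this
    rw [pvGoA, pvGoAlt_eq_none _ rfl]
  | succ n ih =>
    intro cs hle
    cases cs with
    | nil => rw [pvGoA, pvGoAlt_eq_none _ rfl]
    | cons c r =>
      by_cases h1 : c = '-' ∧ r.head? = some '-'
      · -- line comment opener at the head
        obtain ⟨rfl, hh⟩ := h1
        obtain ⟨t, rfl⟩ : ∃ t, r = '-' :: t := by
          cases r with
          | nil => simp at hh
          | cons a t => simp at hh; exact ⟨t, by rw [hh]⟩
        have he : pvEarliest ('-' :: '-' :: t) = some (0, 0) := by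
          rw [pvEarliest_cons]; simp
        have hA : pvGoA ('-' :: '-' :: t) false false = pvGoA (pvSkipLine t) false false := by
          rw [pvGoA]; simp [pvSkipLine]
        rw [pvGoAlt_eq_some _ _ _ he, hA]
        simp only [List.take_zero, List.nil_append]
        norm_num
        cases hf : pvFindCh '\n' t with
        | none => rw [pvSkipLine_of_none t hf, pvGoA]
        | some j =>
          rw [pvSkipLine_of_some t j hf]
          show pvGoA (t.drop j) false false = pvGoAlt (List.drop (2 + j) ('-' :: '-' :: t))
          rw [show 2 + j = j + 1 + 1 by omega, List.drop_succ_cons, List.drop_succ_cons]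
          exact ih (t.drop j) (by simp at hle ⊢; omega)
      · by_cases h2 : c = '/' ∧ r.head? = some '*'
        · -- block comment opener at the head
          obtain ⟨rfl, hh⟩ := h2
          obtain ⟨t, rfl⟩ : ∃ t, r = '*' :: t := by
            cases r with
            | nil => simp at hh
            | cons a t => simp at hh; exact ⟨t, by rw [hh]⟩
          have he : pvEarliest ('/' :: '*' :: t) = some (0, 1) := by
            rw [pvEarliest_cons]; simp
          rw [pvGoAlt_eq_some _ _ _ he]
          simp only [List.take_zero, List.nil_append]
          norm_num
          cases hf : pvFind2 '*' '/' t with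
          | none =>
            have hb := pvSkipBlock_of_none t hf
            rw [pvGoA_block, hb]
            rfl
          | some j =>
            have hb := pvSkipBlock_of_some t j hf
            rw [pvGoA_block, hb]
            show pvGoA (t.drop (j + 2)) false false = pvGoAlt (List.drop (2 + j) t)
            rw [show 2 + j = j + 2 by omega]
            exact ih (t.drop (j + 2)) (by simp at hle ⊢; omega)
        · by_cases h3 : c = '\''
          · -- single-quote opener at the head
            subst h3
            have he : pvEarliest ('\'' :: r) = some (0, 2) := by
              rw [pvEarliest_cons]; simp
            have hA : pvGoA ('\'' :: r) false false = pvGoA r true false := by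
              rw [pvGoA]; simp
            rw [pvGoAlt_eq_some _ _ _ he, hA, pvGoA_sq_close r.length r le_rfl]
            simp only [List.take_zero, List.nil_append]
            norm_num
            cases hq : pvFindClose '\'' r with
            | none => simp
            | some rest =>
              simp only [Option.elim]
              exact ih rest (by
                have := pvFindClose_len '\'' r rest hq
                simp at hle; omega)
          · by_cases h4 : c = '"'
            · -- double-quote opener at the head
              subst h4
              have he : pvEarliest ('"' :: r) = some (0, 3) := by
                rw [pvEarliest_cons]; simp
              have hA : pvGoA ('"' :: r) false false = pvGoA r false true := by
                rw [pvGoA]; simp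
              rw [pvGoAlt_eq_some _ _ _ he, hA, pvGoA_dq_close r.length r le_rfl]
              simp only [List.take_zero, List.nil_append]
              norm_num
              cases hq : pvFindClose '"' r with
              | none => simp
              | some rest =>
                simp only [Option.elim]
                exact ih rest (by
                  have := pvFindClose_len '"' r rest hq
                  simp at hle; omega)
            · -- no opener at the head: both sides emit c and continue
              have he := pvEarliest_cons c r
              rw [if_neg h1, if_neg h2, if_neg h3, if_neg h4] at he
              have hA : pvGoA (c :: r) false false = c :: pvGoA r false false := by
                rw [pvGoA]; simp [h1, h2, h3, h4]
              cases her : pvEarliest r with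
              | none =>
                rw [her] at he; simp at he
                rw [hA, pvGoAlt_eq_none _ he, ih r (by simp at hle; omega),
                  pvGoAlt_eq_none _ her]
              | some pk =>
                obtain ⟨p, k⟩ := pk
                rw [her] at he; simp [pvShift] at he
                rw [hA, pvGoAlt_peel c r p k her he, ih r (by simp at hle; omega)]

theorem pv_main (cs : List Char) : pvGoA cs false false = pvGoAlt cs :=
  pv_main_aux cs.length cs le_rfl

-- ===== VERDICT (by name: the statement is the Claim_ definition above) =====
theorem strip_strings_and_comments_spec : Claim_equal_strip_strings_and_comments := by
  intro sql _
  unfold Spec_strip_strings_and_comments strip_strings_and_comments strip_strings_and_comments_alt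
  rw [pv_main]
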